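-- pv_equiv track=rewrite | github.com/Zhao0335/medical_dataset_generate | patient_simulator.py | _get_gap_expression_hints
-- ===== SOURCE A (Python) =====
-- from typing import Any, Dict, List, Optional
--
-- def _get_gap_expression_hints(gaps: List[str]) -> str:
--     if not gaps:
--         return (
--             "No knowledge gaps detected - patient understands current information"
--         )
--
--     hints = ["How to naturally express these knowledge gaps:"]
--
--     for gap in gaps[:3]:
--         gap_lower = gap.lower()
--         if "severity" in gap_lower or "serious" in gap_lower:
--             hints.append("- 'How serious is this condition?'")
--         elif "cause" in gap_lower or "why" in gap_lower:
--             hints.append("- 'What caused this to happen?'")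
--         elif "treatment" in gap_lower or "treat" in gap_lower:
--             hints.append("- 'What are the treatment options?'")
--         elif "medication" in gap_lower or "drug" in gap_lower:
--             hints.append("- 'What does this medication do?'")
--         elif "test" in gap_lower or "examination" in gap_lower:
--             hints.append("- 'What will the test show?'")
--         elif "prognosis" in gap_lower or "outcome" in gap_lower:
--             hints.append("- 'What's the expected outcome?'")
--         else:
--             hints.append(f"- Express confusion about: {gap}")
--
--     return "\n".join(hints)
-- ===== SOURCE B (Python) =====
-- _KEYWORDS = [
--     "severity", "serious", "cause", "why", "treatment", "treat",
--     "medication", "drug", "test", "examination", "prognosis", "outcome",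
-- ]
--
-- _HINTS = [
--     "- 'How serious is this condition?'",
--     "- 'What caused this to happen?'",
--     "- 'What are the treatment options?'",
--     "- 'What does this medication do?'",
--     "- 'What will the test show?'",
--     "- 'What's the expected outcome?'",
-- ]
--
--
-- def _hint_tail(gaps, k):
--     """Recursively render '\\n' + line for up to k leading gaps."""
--     if k == 0 or not gaps:
--         return ""
--     gap = gaps[0]
--     g = gap.lower()
--     i = next((j for j, kw in enumerate(_KEYWORDS) if kw in g), None)
--     line = _HINTS[i // 2] if i is not None else "- Express confusion about: " + gap
--     return "\n" + line + _hint_tail(gaps[1:], k - 1)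
--
--
-- def _get_gap_expression_hints(gaps):
--     if not gaps:
--         return "No knowledge gaps detected - patient understands current information"
--     return "How to naturally express these knowledge gaps:" + _hint_tail(gaps, 3)
-- ===== Notes on version B (the rewrite author's own statement) =====
-- stated objective: alternative
-- what changed: Replaces the imperative loop that appends into a hints list and joins with the if/elif chain by a direct recursion over the gap list with a countdown counter that concatenates '\n'+line strings (no intermediate list, no join), choosing each line via the first matching index in a flat 12-keyword list and index//2 into a hint array.
import Mathlib
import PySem

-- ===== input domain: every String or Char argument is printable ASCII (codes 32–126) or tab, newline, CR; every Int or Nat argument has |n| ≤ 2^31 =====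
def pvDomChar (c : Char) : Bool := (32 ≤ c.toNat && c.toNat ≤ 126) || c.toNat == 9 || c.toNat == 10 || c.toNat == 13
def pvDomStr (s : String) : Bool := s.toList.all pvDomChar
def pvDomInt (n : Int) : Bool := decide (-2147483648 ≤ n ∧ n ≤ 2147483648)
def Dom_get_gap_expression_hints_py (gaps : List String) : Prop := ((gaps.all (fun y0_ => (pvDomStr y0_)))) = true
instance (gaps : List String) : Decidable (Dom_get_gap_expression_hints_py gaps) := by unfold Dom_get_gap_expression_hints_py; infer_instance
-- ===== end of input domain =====

-- B rebuilds the result by direct recursion over the gap list with a countdown counter,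
-- concatenating "\n"+line directly (no hints list, no join), and picks each line by the
-- first matching index in a flat 12-keyword list with index//2 into a hint array
-- (objective: alternative decomposition, same cost).


-- ===== PORT A =====
-- A's loop body: the six-branch if/elif chain, appending one hint per gap.
def pvStepA (hints : List String) (gap : String) : List String :=
  let gap_lower := PySem.Str.lower gap
  if PySem.Str.isIn "severity" gap_lower || PySem.Str.isIn "serious" gap_lower then
    hints ++ ["- 'How serious is this condition?'"]
  else if PySem.Str.isIn "cause" gap_lower || PySem.Str.isIn "why" gap_lower then
    hints ++ ["- 'What caused this to happen?'"]
  else if PySem.Str.isIn "treatment" gap_lower || PySem.Str.isIn "treat" gap_lower then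
    hints ++ ["- 'What are the treatment options?'"]
  else if PySem.Str.isIn "medication" gap_lower || PySem.Str.isIn "drug" gap_lower then
    hints ++ ["- 'What does this medication do?'"]
  else if PySem.Str.isIn "test" gap_lower || PySem.Str.isIn "examination" gap_lower then
    hints ++ ["- 'What will the test show?'"]
  else if PySem.Str.isIn "prognosis" gap_lower || PySem.Str.isIn "outcome" gap_lower then
    hints ++ ["- 'What's the expected outcome?'"]
  else
    hints ++ ["- Express confusion about: " ++ gap]

def get_gap_expression_hints_py (gaps : List String) : String :=
  if gaps = [] then
    "No knowledge gaps detected - patient understands current information"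
  else
    let hints :=
      (PySem.List.slice gaps none (some 3)).foldl pvStepA
        ["How to naturally express these knowledge gaps:"]
    PySem.Str.join "\n" hints

-- ===== PORT B =====
def pvKeywords : List String :=
  ["severity", "serious", "cause", "why", "treatment", "treat",
   "medication", "drug", "test", "examination", "prognosis", "outcome"]

def pvHints : List String :=
  ["- 'How serious is this condition?'",
   "- 'What caused this to happen?'",
   "- 'What are the treatment options?'",
   "- 'What does this medication do?'",
   "- 'What will the test show?'",
   "- 'What's the expected outcome?'"]

-- _hint_tail: recursion over the list with a countdown k; 'next(j for …)' is findIdx?,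
-- _HINTS[i // 2] is getD (i / 2) "" (i / 2 < 6 always, so the default is never used).
def pvHintTail : List String → Nat → String
  | _, 0 => ""
  | [], _ + 1 => ""
  | gap :: rest, k + 1 =>
    let g := PySem.Str.lower gap
    let line :=
      match pvKeywords.findIdx? (fun kw => PySem.Str.isIn kw g) with
      | some i => pvHints.getD (i / 2) ""
      | none => "- Express confusion about: " ++ gap
    "\n" ++ line ++ pvHintTail rest k

def get_gap_expression_hints_py_alt (gaps : List String) : String :=
  if gaps = [] then
    "No knowledge gaps detected - patient understands current information"
  else
    "How to naturally express these knowledge gaps:" ++ pvHintTail gaps 3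

-- ===== PRECONDITION & SPEC =====
def Spec_get_gap_expression_hints_py (gaps : List String) (out : String) : Prop := out = get_gap_expression_hints_py_alt gaps
instance (gaps : List String) (out : String) : Decidable (Spec_get_gap_expression_hints_py gaps out) := by unfold Spec_get_gap_expression_hints_py; infer_instance

-- ===== CLAIM (what is proved, stated in full; the proofs are below) =====
def Claim_equal_get_gap_expression_hints_py : Prop := ∀ (gaps : List String), Dom_get_gap_expression_hints_py gaps → Spec_get_gap_expression_hints_py gaps (get_gap_expression_hints_py gaps)

-- ===== LEMMAS AND PROOFS =====

-- Proof-side name for the line B computes for one gap (the body of pvHintTail's `line`).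
def pvLineB (gap : String) : String :=
  let g := PySem.Str.lower gap
  match pvKeywords.findIdx? (fun kw => PySem.Str.isIn kw g) with
  | some i => pvHints.getD (i / 2) ""
  | none => "- Express confusion about: " ++ gap

-- Per-gap: A's branch chain appends exactly the line B's keyword-index lookup yields.
theorem pvStepA_eq (hints : List String) (gap : String) :
    pvStepA hints gap = hints ++ [pvLineB gap] := by
  unfold pvStepA pvLineB pvKeywords pvHints
  simp only [List.findIdx?_cons, List.findIdx?_nil]
  by_cases k1 : PySem.Chars.isIn ['s', 'e', 'v', 'e', 'r', 'i', 't', 'y'] (PySem.Chars.lower gap.toList) = true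
  · simp [k1]
  by_cases k2 : PySem.Chars.isIn ['s', 'e', 'r', 'i', 'o', 'u', 's'] (PySem.Chars.lower gap.toList) = true
  · simp [k1, k2]
  by_cases k3 : PySem.Chars.isIn ['c', 'a', 'u', 's', 'e'] (PySem.Chars.lower gap.toList) = true
  · simp [k1, k2, k3]
  by_cases k4 : PySem.Chars.isIn ['w', 'h', 'y'] (PySem.Chars.lower gap.toList) = true
  · simp [k1, k2, k3, k4]
  by_cases k5 : PySem.Chars.isIn ['t', 'r', 'e', 'a', 't', 'm', 'e', 'n', 't'] (PySem.Chars.lower gap.toList) = true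
  · simp [k1, k2, k3, k4, k5]
  by_cases k6 : PySem.Chars.isIn ['t', 'r', 'e', 'a', 't'] (PySem.Chars.lower gap.toList) = true
  · simp [k1, k2, k3, k4, k5, k6]
  by_cases k7 : PySem.Chars.isIn ['m', 'e', 'd', 'i', 'c', 'a', 't', 'i', 'o', 'n'] (PySem.Chars.lower gap.toList) = true
  · simp [k1, k2, k3, k4, k5, k6, k7]
  by_cases k8 : PySem.Chars.isIn ['d', 'r', 'u', 'g'] (PySem.Chars.lower gap.toList) = true
  · simp [k1, k2, k3, k4, k5, k6, k7, k8]
  by_cases k9 : PySem.Chars.isIn ['t', 'e', 's', 't'] (PySem.Chars.lower gap.toList) = true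
  · simp [k1, k2, k3, k4, k5, k6, k7, k8, k9]
  by_cases k10 : PySem.Chars.isIn ['e', 'x', 'a', 'm', 'i', 'n', 'a', 't', 'i', 'o', 'n'] (PySem.Chars.lower gap.toList) = true
  · simp [k1, k2, k3, k4, k5, k6, k7, k8, k9, k10]
  by_cases k11 : PySem.Chars.isIn ['p', 'r', 'o', 'g', 'n', 'o', 's', 'i', 's'] (PySem.Chars.lower gap.toList) = true
  · simp [k1, k2, k3, k4, k5, k6, k7, k8, k9, k10, k11]
  by_cases k12 : PySem.Chars.isIn ['o', 'u', 't', 'c', 'o', 'm', 'e'] (PySem.Chars.lower gap.toList) = true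
  · simp [k1, k2, k3, k4, k5, k6, k7, k8, k9, k10, k11, k12]
  simp [k1, k2, k3, k4, k5, k6, k7, k8, k9, k10, k11, k12]

-- A's foldl accumulates the per-gap lines after the initial list.
theorem pvFoldA_eq (l : List String) (init : List String) :
    l.foldl pvStepA init = init ++ l.map pvLineB := by
  induction l generalizing init with
  | nil => simp
  | cons x xs ih => simp [List.foldl, pvStepA_eq, ih, List.append_assoc]

theorem pvJoin_cons_cons (h x : String) (xs : List String) :
    PySem.Str.join "\n" (h :: x :: xs) = h ++ "\n" ++ PySem.Str.join "\n" (x :: xs) := by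
  apply String.toList_inj.mp
  simp [PySem.Str.join, PySem.Chars.join_cons_cons]

theorem pvJoin_singleton (h : String) : PySem.Str.join "\n" [h] = h := by
  apply String.toList_inj.mp
  simp [PySem.Str.join, PySem.Chars.join, List.intercalate]

theorem pvHintTail_cons (gap : String) (rest : List String) (k : Nat) :
    pvHintTail (gap :: rest) (k + 1) = "\n" ++ pvLineB gap ++ pvHintTail rest k := rfl

-- Joining a header with B's lines for the first k gaps is the header plus pvHintTail.
theorem pvJoin_eq_tail (l : List String) (k : Nat) (h : String) :
    PySem.Str.join "\n" (h :: (l.take k).map pvLineB) = h ++ pvHintTail l k := by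
  induction l generalizing k h with
  | nil =>
    cases k <;> simp [pvHintTail, pvJoin_singleton]
  | cons x rest ih =>
    cases k with
    | zero => simp [pvHintTail, pvJoin_singleton]
    | succ k =>
      rw [List.take_succ_cons, List.map_cons, pvJoin_cons_cons, ih k (pvLineB x),
        pvHintTail_cons]
      simp [String.append_assoc]

-- ===== VERDICT (by name: the statement is the Claim_ definition above) =====
theorem get_gap_expression_hints_py_spec : Claim_equal_get_gap_expression_hints_py := by
  intro gaps _
  unfold Spec_get_gap_expression_hints_py get_gap_expression_hints_py get_gap_expression_hints_py_alt
  by_cases h : gaps = []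
  · simp [h]
  · simp only [h, if_false]
    have hs : PySem.List.slice gaps none (some 3) = gaps.take 3 := by
      exact PySem.List.slice_to_natCast gaps 3
    rw [hs, pvFoldA_eq, List.singleton_append, pvJoin_eq_tail]
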